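-- pv_equiv track=rewrite | github.com/batukochan/VSCode-Python-Egitimi | 04_liste_string_metodlar.py/0418_dictionary_genel_calisma.py | harfSay
-- ===== SOURCE A (Python) =====
-- def harfSay(metin):
--     '''
--     Ör. {'a':'3','b':'7'}
--     '''
--     harfler = dict()
--     for harf in metin:
--
--         if harf.isalpha():
--             if harf in  harfler.keys():
--                 harfler[harf] += 1
--             else:
--                 harfler[harf] = 1
--     return harfler
-- ===== SOURCE B (Python) =====
-- def harfSay(metin):
--     '''Two-phase: collect the distinct letters in first-appearance order, then count each.'''
--     seen = dict.fromkeys(h for h in metin if h.isalpha())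
--     return {h: sum(1 for x in metin if x == h) for h in seen}
-- ===== Notes on version B (the rewrite author's own statement) =====
-- stated objective: alternative
-- what changed: Replaces the single-pass running-tally dict accumulation with a two-phase scheme: first dedup the letters in first-appearance order (dict.fromkeys), then compute each letter's count by its own scan of the string.
import Mathlib
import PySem

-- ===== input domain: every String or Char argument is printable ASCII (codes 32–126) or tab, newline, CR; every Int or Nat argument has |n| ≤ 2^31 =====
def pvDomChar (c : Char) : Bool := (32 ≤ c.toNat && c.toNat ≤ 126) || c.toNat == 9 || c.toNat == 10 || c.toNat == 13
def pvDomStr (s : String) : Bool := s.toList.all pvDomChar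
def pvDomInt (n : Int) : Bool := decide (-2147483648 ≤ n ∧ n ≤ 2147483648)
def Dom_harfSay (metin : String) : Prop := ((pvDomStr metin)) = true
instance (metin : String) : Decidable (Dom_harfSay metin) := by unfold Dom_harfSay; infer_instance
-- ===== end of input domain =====

-- B replaces A's single-pass running-tally dict with a two-phase scheme (dedup the letters
-- in first-appearance order, then count each letter by its own scan); alternative, not faster.

-- ===== PORT A =====
def harfSay (metin : String) : List (String × Int) :=
  (metin.toList.foldl
    (fun harfler harf =>
      if PySem.Chars.isalpha harf then
        if harfler.contains (String.singleton harf) then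
          harfler.insert (String.singleton harf) (harfler.getD (String.singleton harf) 0 + 1)
        else
          harfler.insert (String.singleton harf) 1
      else harfler)
    (PySem.Dict.empty : PySem.Dict String Int)).items

-- ===== PORT B =====
def harfSay_alt (metin : String) : List (String × Int) :=
  (PySem.List.dedup (metin.toList.filter PySem.Chars.isalpha)).map
    (fun h => (String.singleton h,
      ((metin.toList.map (fun x => if x == h then (1 : Int) else 0)).sum)))

-- ===== PRECONDITION & SPEC =====
def Spec_harfSay (metin : String) (out : List (String × Int)) : Prop := out = harfSay_alt metin
instance (metin : String) (out : List (String × Int)) : Decidable (Spec_harfSay metin out) := by unfold Spec_harfSay; infer_instance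

-- ===== CLAIM (what is proved, stated in full; the proofs are below) =====
def Claim_equal_harfSay : Prop := ∀ (metin : String), Dom_harfSay metin → Spec_harfSay metin (harfSay metin)

-- ===== LEMMAS AND PROOFS =====

-- String.singleton is injective
lemma singleton_inj : Function.Injective String.singleton := by
  intro a b h
  have : (String.singleton a).toList = (String.singleton b).toList := by rw [h]
  simpa [String.singleton] using this

-- A's inner branch is exactly the counter step
lemma step_eq (d : PySem.Dict String Int) (k : String) :
    (if d.contains k then d.insert k (d.getD k 0 + 1) else d.insert k 1)
      = d.modify k 0 (· + 1) := by
  unfold PySem.Dict.modify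
  by_cases h : d.contains k = true
  · simp [h]
  · have h0 : d.getD k 0 = 0 := by
      have hn := (PySem.Dict.get?_eq_none_iff_contains d k).mpr (by simpa using h)
      simp [PySem.Dict.getD, hn]
    simp [h, h0]

-- A's fold over the string is the counter fold over the filtered, singleton-mapped letters
lemma fold_eq (xs : List Char) (d : PySem.Dict String Int) :
    xs.foldl
      (fun harfler harf =>
        if PySem.Chars.isalpha harf then
          if harfler.contains (String.singleton harf) then
            harfler.insert (String.singleton harf) (harfler.getD (String.singleton harf) 0 + 1)
          else
            harfler.insert (String.singleton harf) 1
        else harfler) d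
      = ((xs.filter PySem.Chars.isalpha).map String.singleton).foldl
          (fun d k => d.modify k 0 (· + 1)) d := by
  induction xs generalizing d with
  | nil => rfl
  | cons c t ih =>
    by_cases h : PySem.Chars.isalpha c = true
    · rw [List.foldl_cons, List.filter_cons_of_pos h, List.map_cons, List.foldl_cons,
        if_pos h, step_eq]
      exact ih _
    · rw [List.foldl_cons, List.filter_cons_of_neg h, if_neg h]
      exact ih _

-- ofList commutes with mapping an injective function
lemma ofList_map_of_inj {α β : Type} [BEq α] [LawfulBEq α] [BEq β] [LawfulBEq β]
    (f : α → β) (hf : Function.Injective f) (l : List α) (s : List α) :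
    List.foldl PySem.Set.add (s.map f) (l.map f)
      = (List.foldl PySem.Set.add s l).map f := by
  induction l generalizing s with
  | nil => rfl
  | cons x t ih =>
    have hc : PySem.Set.contains (s.map f) (f x) = PySem.Set.contains s x := by
      unfold PySem.Set.contains
      rw [Bool.eq_iff_iff]
      simp [List.mem_map, hf.eq_iff]
    simp only [List.map_cons, List.foldl_cons, PySem.Set.add, hc]
    by_cases hx : PySem.Set.contains s x = true
    · simp only [hx, if_true, ih]
    · rw [if_neg hx, if_neg hx,
        show List.map f s ++ [f x] = List.map f (s ++ [x]) by simp]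
      exact ih _

lemma ofList_map_singleton (l : List Char) :
    PySem.Set.ofList (l.map String.singleton)
      = (PySem.Set.ofList l).map String.singleton := by
  unfold PySem.Set.ofList
  have := ofList_map_of_inj String.singleton singleton_inj l []
  simpa [PySem.Set.empty] using this

-- ===== VERDICT (by name: the statement is the Claim_ definition above) =====
theorem harfSay_spec : Claim_equal_harfSay := by
  intro metin _
  unfold Spec_harfSay harfSay harfSay_alt
  rw [fold_eq, ← PySem.Dict.counter_eq_foldl, PySem.Dict.items_counter,
    ofList_map_singleton, List.map_map, PySem.List.dedup_eq_ofList]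
  apply List.map_congr_left
  intro c hc
  have hcmem : c ∈ metin.toList.filter PySem.Chars.isalpha :=
    (PySem.Set.mem_ofList _ _).mp hc
  have halpha : PySem.Chars.isalpha c = true := (List.mem_filter.mp hcmem).2
  simp only [Function.comp]
  congr 1
  rw [List.count_map_of_injective _ _ singleton_inj,
    List.count_filter halpha,
    PySem.List.sum_map_ite_one_zero (· == c) metin.toList]
  simp [List.count]
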